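-- pv_equiv track=rewrite | github.com/glm35/abcted | abcted/abcparser.py | _is_header
-- ===== SOURCE A (Python) =====
-- def _is_header(line: str) -> bool:
--     """Tell whether a line looks like an ABC header
--
--     Args:
--         line: line of text to check
--
--     Returns:
--         True (line is header) or False (line is not header)
--
--     """
--     abc_headers = ['A:', 'B:', 'C:', 'D:', 'E:', 'F:', 'G:', 'H:', 'I:',
--                    'K:', 'L:', 'M:', 'N:', 'O:', 'P:', 'Q:', 'R:', 'S:',
--                    'T:', 'W:', 'X:', 'Z:']
--     for header in abc_headers:
--         if line.startswith(header):
--             return True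
--     return False
-- ===== SOURCE B (Python) =====
-- def _is_header(line: str) -> bool:
--     """Tell whether a line looks like an ABC header (char-class check, no prefix loop)."""
--     if len(line) < 2 or line[1] != ':':
--         return False
--     c = line[0]
--     return 'A' <= c <= 'I' or 'K' <= c <= 'T' or c in 'WXZ'
-- ===== Notes on version B (the rewrite author's own statement) =====
-- stated objective: simpler
-- what changed: Replaces the loop over 22 two-character literal prefixes with a single direct test on the first two characters (a colon in second place, a header letter in first).
import Mathlib
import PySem

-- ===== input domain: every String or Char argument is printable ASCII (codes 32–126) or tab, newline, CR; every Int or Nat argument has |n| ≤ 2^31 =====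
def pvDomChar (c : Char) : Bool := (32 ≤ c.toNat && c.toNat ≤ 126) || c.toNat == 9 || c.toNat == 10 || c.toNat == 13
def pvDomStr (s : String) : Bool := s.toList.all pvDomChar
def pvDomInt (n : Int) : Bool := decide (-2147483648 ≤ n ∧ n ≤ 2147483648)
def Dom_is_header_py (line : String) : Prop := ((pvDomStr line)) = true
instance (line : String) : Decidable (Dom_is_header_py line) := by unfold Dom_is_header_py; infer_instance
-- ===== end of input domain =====

-- B replaces A's loop over 22 literal prefixes by one direct character-class test (objective: simpler).

-- ===== PORT A =====
-- the for-loop with early return over the header list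
def isHeaderLoop (headers : List String) (line : String) : Bool :=
  match headers with
  | [] => false
  | h :: rest => if PySem.Str.startswith line h then true else isHeaderLoop rest line

def is_header_py (line : String) : Bool :=
  isHeaderLoop ["A:", "B:", "C:", "D:", "E:", "F:", "G:", "H:", "I:",
                "K:", "L:", "M:", "N:", "O:", "P:", "Q:", "R:", "S:",
                "T:", "W:", "X:", "Z:"] line

-- ===== PORT B =====
def is_header_py_alt (line : String) : Bool :=
  match line.toList with
  | c :: c1 :: _ =>
    if c1 ≠ ':' then false
    else ('A' ≤ c && c ≤ 'I') || ('K' ≤ c && c ≤ 'T') || ['W', 'X', 'Z'].contains c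
  | _ => false

-- ===== PRECONDITION & SPEC =====
def Spec_is_header_py (line : String) (out : Bool) : Prop := out = is_header_py_alt line
instance (line : String) (out : Bool) : Decidable (Spec_is_header_py line out) := by unfold Spec_is_header_py; infer_instance

-- ===== CLAIM (what is proved, stated in full; the proofs are below) =====
def Claim_equal_is_header_py : Prop := ∀ (line : String), Dom_is_header_py line → Spec_is_header_py line (is_header_py line)

-- ===== LEMMAS AND PROOFS =====

theorem ifTrueElse (b x : Bool) : (if b = true then true else x) = (b || x) := by
  cases b <;> simp

theorem charEq (c d : Char) : c = d ↔ c.toNat = d.toNat := by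
  constructor
  · intro h; rw [h]
  · intro h; exact Char.ext (UInt32.toNat_inj.mp h)

theorem charLe (c d : Char) : c ≤ d ↔ c.toNat ≤ d.toNat := by
  rw [Char.le_def, UInt32.le_iff_toNat_le]; rfl

theorem startswith_two (line : String) (p : String) (a b : Char) (hp : p.toList = [a, b]) :
    PySem.Str.startswith line p =
      match line.toList with
      | c :: c1 :: _ => (c = a && c1 = b)
      | _ => false := by
  simp only [PySem.Str.startswith_eq, hp]
  match h : line.toList with
  | [] => simp [PySem.Chars.startswith]
  | [c] => simp [PySem.Chars.startswith, List.isPrefixOf]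
  | c :: c1 :: rest =>
    simp only [PySem.Chars.startswith]
    by_cases h1 : c = a <;> by_cases h2 : c1 = b <;>
      simp [h1, h2, List.isPrefixOf] <;> aesop

-- ===== VERDICT (by name: the statement is the Claim_ definition above) =====
theorem is_header_py_spec : Claim_equal_is_header_py := by
  intro line _
  unfold Spec_is_header_py is_header_py is_header_py_alt
  simp only [isHeaderLoop]
  rw [startswith_two line "A:" 'A' ':' (by decide), startswith_two line "B:" 'B' ':' (by decide),
      startswith_two line "C:" 'C' ':' (by decide), startswith_two line "D:" 'D' ':' (by decide),
      startswith_two line "E:" 'E' ':' (by decide), startswith_two line "F:" 'F' ':' (by decide),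
      startswith_two line "G:" 'G' ':' (by decide), startswith_two line "H:" 'H' ':' (by decide),
      startswith_two line "I:" 'I' ':' (by decide), startswith_two line "K:" 'K' ':' (by decide),
      startswith_two line "L:" 'L' ':' (by decide), startswith_two line "M:" 'M' ':' (by decide),
      startswith_two line "N:" 'N' ':' (by decide), startswith_two line "O:" 'O' ':' (by decide),
      startswith_two line "P:" 'P' ':' (by decide), startswith_two line "Q:" 'Q' ':' (by decide),
      startswith_two line "R:" 'R' ':' (by decide), startswith_two line "S:" 'S' ':' (by decide),
      startswith_two line "T:" 'T' ':' (by decide), startswith_two line "W:" 'W' ':' (by decide),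
      startswith_two line "X:" 'X' ':' (by decide), startswith_two line "Z:" 'Z' ':' (by decide)]
  match h : line.toList with
  | [] => rfl
  | [c] => rfl
  | c :: c1 :: rest =>
    simp only [ifTrueElse]
    cases hc1 : decide (c1 = ':') with
    | false => simp [hc1]
    | true =>
      simp only [decide_eq_true_eq] at hc1
      subst hc1
      simp only [Bool.and_true, ne_eq, not_true_eq_false, if_false]
      apply Bool.eq_iff_iff.mpr
      simp only [Bool.or_eq_true, Bool.and_eq_true, decide_eq_true_eq, List.contains_eq_mem,
        List.mem_cons, List.not_mem_nil, or_false, Bool.false_eq_true, charEq, charLe, (show 'A'.toNat = 65 from rfl), (show 'B'.toNat = 66 from rfl), (show 'C'.toNat = 67 from rfl), (show 'D'.toNat = 68 from rfl), (show 'E'.toNat = 69 from rfl), (show 'F'.toNat = 70 from rfl), (show 'G'.toNat = 71 from rfl), (show 'H'.toNat = 72 from rfl), (show 'I'.toNat = 73 from rfl), (show 'K'.toNat = 75 from rfl), (show 'L'.toNat = 76 from rfl), (show 'M'.toNat = 77 from rfl), (show 'N'.toNat = 78 from rfl), (show 'O'.toNat = 79 from rfl), (show 'P'.toNat = 80 from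 rfl), (show 'Q'.toNat = 81 from rfl), (show 'R'.toNat = 82 from rfl), (show 'S'.toNat = 83 from rfl), (show 'T'.toNat = 84 from rfl), (show 'W'.toNat = 87 from rfl), (show 'X'.toNat = 88 from rfl), (show 'Z'.toNat = 90 from rfl)]
      omega
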